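-- pv_equiv track=rewrite | github.com/justbeaver97/2022-Algorithm_Study | Baekjoon/Simulation/3613번 Java vs C++.py | is_cpp
-- ===== SOURCE A (Python) =====
-- def is_cpp(alphabets):
--     count = -2
--     for i in range(len(alphabets)):
--         if alphabets[i] == "_":
--             if count == i - 1:  return False
--             else:               count = i
--         elif 65 <= ord(alphabets[i]) <= 90: return False
--     return True
-- ===== SOURCE B (Python) =====
-- def is_cpp(alphabets):
--     has_upper = any(65 <= ord(c) <= 90 for c in alphabets)
--     has_double_underscore = any(a == "_" == b for a, b in zip(alphabets, alphabets[1:]))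
--     return (not has_upper) and (not has_double_underscore)
-- ===== Notes on version B (the rewrite author's own statement) =====
-- stated objective: simpler
-- what changed: Replaced A's single indexed loop carrying a last-underscore-position state variable by two independent stateless scans: an any() over characters for uppercase, and an any() over adjacent pairs (zip with the tail) for a double underscore.
import Mathlib
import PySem

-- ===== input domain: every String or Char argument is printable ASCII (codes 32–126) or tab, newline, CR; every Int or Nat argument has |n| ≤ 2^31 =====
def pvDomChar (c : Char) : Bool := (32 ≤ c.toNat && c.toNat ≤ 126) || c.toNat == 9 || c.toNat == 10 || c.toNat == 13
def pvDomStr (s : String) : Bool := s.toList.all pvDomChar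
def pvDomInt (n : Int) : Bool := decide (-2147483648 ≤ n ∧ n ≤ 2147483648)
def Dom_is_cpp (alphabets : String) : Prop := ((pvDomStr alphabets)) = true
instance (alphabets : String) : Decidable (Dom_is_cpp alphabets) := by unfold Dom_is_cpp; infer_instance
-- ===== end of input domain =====

-- B replaces A's indexed loop with a 'last underscore index' state by two independent
-- stateless scans (uppercase anywhere; '_' at two adjacent positions); simpler decomposition.

-- ===== PORT A =====
-- A's for-loop over range(len(alphabets)) with early returns and the running index `count`,
-- transcribed as structural recursion over the characters carrying i and count.
def is_cppLoop : List Char → Int → Int → Bool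
  | [], _, _ => true
  | c :: rest, i, count =>
    if c = '_' then
      if count = i - 1 then false else is_cppLoop rest (i + 1) i
    else if 65 ≤ c.toNat ∧ c.toNat ≤ 90 then false
    else is_cppLoop rest (i + 1) count

def is_cpp (alphabets : String) : Bool := is_cppLoop alphabets.toList 0 (-2)

-- ===== PORT B =====
def isUpperAscii (c : Char) : Bool := 65 ≤ c.toNat && c.toNat ≤ 90

def is_cpp_alt (alphabets : String) : Bool :=
  let l := alphabets.toList
  let hasUpper := l.any isUpperAscii
  let hasDoubleUnderscore := (l.zip l.tail).any (fun p => p.1 = '_' && p.2 = '_')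
  !hasUpper && !hasDoubleUnderscore

-- ===== PRECONDITION & SPEC =====
def Spec_is_cpp (alphabets : String) (out : Bool) : Prop := out = is_cpp_alt alphabets
instance (alphabets : String) (out : Bool) : Decidable (Spec_is_cpp alphabets out) := by unfold Spec_is_cpp; infer_instance

-- ===== CLAIM (what is proved, stated in full; the proofs are below) =====
def Claim_equal_is_cpp : Prop := ∀ (alphabets : String), Dom_is_cpp alphabets → Spec_is_cpp alphabets (is_cpp alphabets)

-- ===== LEMMAS AND PROOFS =====

-- B's value as a function of the character list.
def altList (l : List Char) : Bool :=
  !(l.any isUpperAscii) && !((l.zip l.tail).any (fun p => p.1 = '_' && p.2 = '_'))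

theorem altList_cons (x : Char) (r : List Char) :
    altList (x :: r) =
      (!isUpperAscii x && !(match r with | [] => false | y :: _ => x = '_' && y = '_') && altList r) := by
  cases r with
  | nil => simp [altList]
  | cons y r' =>
    simp only [altList, List.tail_cons, List.zip_cons_cons, List.any_cons]
    cases isUpperAscii x <;> cases isUpperAscii y <;> cases r'.any isUpperAscii <;>
      cases decide (x = '_') <;> cases decide (y = '_') <;>
      cases ((y :: r').zip r').any (fun p => decide (p.1 = '_') && decide (p.2 = '_')) <;> rfl

-- Invariant of A's loop: with count strictly below i-1 (no underscore at the previous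
-- position) the loop computes altList; with count = i-1 (underscore just before) it
-- additionally rejects an underscore at the current head.
theorem loop_invariant (l : List Char) :
    (∀ i count : Int, count < i - 1 → is_cppLoop l i count = altList l) ∧
    (∀ i : Int, is_cppLoop l i (i - 1) =
      (match l with | [] => true | x :: _ => if x = '_' then false else altList l)) := by
  induction l with
  | nil => constructor <;> intros <;> simp [is_cppLoop, altList]
  | cons x r ih =>
    obtain ⟨ih1, ih2⟩ := ih
    have hupper : ∀ (i count : Int), (65 ≤ x.toNat ∧ x.toNat ≤ 90) →
        is_cppLoop (x :: r) i count = false := by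
      intro i count h
      by_cases hx : x = '_'
      · subst hx; simp at h
      · simp [is_cppLoop, hx, h]
    constructor
    · intro i count hlt
      by_cases hx : x = '_'
      · subst hx
        have hne : ¬ (count = i - 1) := by omega
        have : is_cppLoop ('_' :: r) i count = is_cppLoop r (i + 1) i := by
          simp [is_cppLoop, hne]
        rw [this]
        have : is_cppLoop r (i + 1) i = is_cppLoop r (i + 1) ((i + 1) - 1) := by norm_num
        rw [this, ih2]
        rw [altList_cons]
        cases r with
        | nil => simp [altList, isUpperAscii]
        | cons y r' =>
          by_cases hy : y = '_'
          · simp [hy, isUpperAscii]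
          · simp [hy, isUpperAscii]
      · by_cases hu : 65 ≤ x.toNat ∧ x.toNat ≤ 90
        · rw [hupper i count hu, altList_cons]
          have : isUpperAscii x = true := by simp [isUpperAscii]; omega
          simp [this]
        · have : is_cppLoop (x :: r) i count = is_cppLoop r (i + 1) count := by
            simp [is_cppLoop, hx, hu]
          rw [this, ih1 (i + 1) count (by omega), altList_cons]
          have hu' : isUpperAscii x = false := by
            simp [isUpperAscii]; omega
          cases r with
          | nil => simp [hu', altList]
          | cons y r' => simp [hu', hx]
    · intro i
      by_cases hx : x = '_'
      · subst hx; simp [is_cppLoop]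
      · by_cases hu : 65 ≤ x.toNat ∧ x.toNat ≤ 90
        · rw [hupper i (i - 1) hu]
          have : isUpperAscii x = true := by simp [isUpperAscii]; omega
          simp [hx, altList_cons, this]
        · have : is_cppLoop (x :: r) i (i - 1) = is_cppLoop r (i + 1) (i - 1) := by
            simp [is_cppLoop, hx, hu]
          rw [this, ih1 (i + 1) (i - 1) (by omega), altList_cons]
          have hu' : isUpperAscii x = false := by
            simp [isUpperAscii]; omega
          cases r with
          | nil => simp [hx, hu', altList]
          | cons y r' => simp [hx, hu']

-- ===== VERDICT (by name: the statement is the Claim_ definition above) =====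
theorem is_cpp_spec : Claim_equal_is_cpp := by
  intro s _
  unfold Spec_is_cpp is_cpp is_cpp_alt
  rw [(loop_invariant s.toList).1 0 (-2) (by omega)]
  simp [altList]
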